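-- pv_equiv track=rewrite | github.com/ruby199/GitHub_rubin | Medium/count_strictly_increasing_subarrays.py | countSubarrays_dynamic_programming
-- ===== SOURCE A (Python) =====
-- def countSubarrays_dynamic_programming(nums):
--     # Runtime: Beats 27.45% of users with Python3
--     # Memory : Beats 9.80% of users with Python3
--     if not nums:
--         return nums
--
--     n = len(nums)
--     dp = [0] * n
--     dp[0] = 1
--     total = dp[0]
--
--     for i in range(1, n):
--         if nums[i - 1] < nums[i]:
--             dp[i] = dp[i - 1] + 1
--         else:
--             dp[i] = 1 # reset the count at this index to 1 (the increasing sequence is broken)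
--         total += dp[i]
--     return total
-- ===== SOURCE B (Python) =====
-- def countSubarrays_dynamic_programming(nums):
--     # Run-length decomposition: each maximal strictly-increasing run of length L
--     # contributes L*(L+1)//2 subarrays, accumulated in one pass with O(1) extra memory.
--     if not nums:
--         return nums
--     total = 0
--     run = 1
--     for i in range(1, len(nums)):
--         if nums[i - 1] < nums[i]:
--             run += 1
--         else:
--             total += run * (run + 1) // 2
--             run = 1
--     return total + run * (run + 1) // 2
-- ===== Notes on version B (the rewrite author's own statement) =====
-- stated objective: simpler
-- what changed: Replaces the O(n) dp array (dp[i] = length of increasing subarrays ending at i, summed each step) with an O(1)-memory run-length scan that adds the closed form L*(L+1)//2 once per maximal strictly-increasing run.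
-- outside the precondition, e.g. on countSubarrays_dynamic_programming([]): A returns [], B returns []
import Mathlib
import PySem

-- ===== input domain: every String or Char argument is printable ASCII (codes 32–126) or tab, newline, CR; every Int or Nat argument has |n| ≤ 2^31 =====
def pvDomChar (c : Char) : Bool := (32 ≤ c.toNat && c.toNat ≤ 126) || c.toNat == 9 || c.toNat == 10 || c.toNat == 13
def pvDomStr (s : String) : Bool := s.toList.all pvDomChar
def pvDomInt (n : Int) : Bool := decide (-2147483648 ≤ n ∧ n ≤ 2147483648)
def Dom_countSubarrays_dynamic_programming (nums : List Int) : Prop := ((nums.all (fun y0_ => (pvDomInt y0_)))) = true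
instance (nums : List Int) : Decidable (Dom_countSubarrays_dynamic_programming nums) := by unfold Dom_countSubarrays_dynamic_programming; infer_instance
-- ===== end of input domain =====

-- B replaces A's O(n) dp array with an O(1)-memory run-length scan adding L*(L+1)//2 per
-- maximal strictly-increasing run; equivalence is about the return value on non-empty input.

-- ===== PORT A =====
-- literal port of A: dp list preallocated, dp[0] = 1, loop i in range(1, n) setting dp[i]
-- and accumulating total (the empty case, where Python A returns the list itself and not
-- an int, is outside Pre_; the port's 0 there is never claimed about)
def countSubarrays_dynamic_programming (nums : List Int) : Int :=
  if nums.isEmpty then 0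
  else
    let n : Int := nums.length
    let dp := PySem.List.pySetD (List.replicate nums.length (0 : Int)) 0 1
    let total := PySem.List.pyGetD dp 0 0
    let st := (PySem.List.pyRange 1 n 1).foldl
      (fun (st : List Int × Int) (i : Int) =>
        let dpi := if PySem.List.pyGetD nums (i - 1) 0 < PySem.List.pyGetD nums i 0
                   then PySem.List.pyGetD st.1 (i - 1) 0 + 1
                   else 1
        (PySem.List.pySetD st.1 i dpi, st.2 + dpi))
      (dp, total)
    st.2

-- ===== PORT B =====
-- loop of Source B: walk the tail carrying (previous element, current run length, closed total);
-- at a break (and at the end) add run*(run+1)//2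
def pvRunLoop (prev run total : Int) : List Int → Int
  | [] => total + PySem.Int.floordiv (run * (run + 1)) 2
  | y :: ys =>
      if prev < y then pvRunLoop y (run + 1) total ys
      else pvRunLoop y 1 (total + PySem.Int.floordiv (run * (run + 1)) 2) ys

def countSubarrays_dynamic_programming_alt (nums : List Int) : Int :=
  match nums with
  | [] => 0
  | x :: xs => pvRunLoop x 1 0 xs

-- ===== PRECONDITION & SPEC =====
-- Pre_ excludes exactly the empty list, on which Python A ('return nums') returns the list
-- itself rather than an integer, so no Int-valued claim can cover it.
def Pre_countSubarrays_dynamic_programming (nums : List Int) : Prop := nums ≠ []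
instance (nums : List Int) : Decidable (Pre_countSubarrays_dynamic_programming nums) := by
  unfold Pre_countSubarrays_dynamic_programming; infer_instance
def pvWitness_countSubarrays_dynamic_programming : List Int := [1, 2, 2, 3]

def Spec_countSubarrays_dynamic_programming (nums : List Int) (out : Int) : Prop := out = countSubarrays_dynamic_programming_alt nums
instance (nums : List Int) (out : Int) : Decidable (Spec_countSubarrays_dynamic_programming nums out) := by unfold Spec_countSubarrays_dynamic_programming; infer_instance

-- ===== CLAIM (what is proved, stated in full; the proofs are below) =====
def Claim_equal_countSubarrays_dynamic_programming : Prop := ∀ (nums : List Int), Dom_countSubarrays_dynamic_programming nums → Pre_countSubarrays_dynamic_programming nums → Spec_countSubarrays_dynamic_programming nums (countSubarrays_dynamic_programming nums)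

-- ===== LEMMAS AND PROOFS =====

-- scalar reading of A's loop: prev = nums[i-1], d = dp[i-1], total so far
def pvAGo (prev d total : Int) : List Int → Int
  | [] => total
  | y :: ys =>
      let d' := if prev < y then d + 1 else 1
      pvAGo y d' (total + d') ys

-- A's indexed fold over pyRange equals the scalar recursion on the suffix
theorem pvFold_eq_aGo (nums : List Int) (k : Nat) (dp : List Int) (d total : Int)
    (hk1 : 1 ≤ k) (hlen : dp.length = nums.length)
    (hd : PySem.List.pyGetD dp ((k : Int) - 1) 0 = d) :
    ((PySem.List.pyRange (k : Int) (nums.length : Int) 1).foldl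
      (fun (st : List Int × Int) (i : Int) =>
        let dpi := if PySem.List.pyGetD nums (i - 1) 0 < PySem.List.pyGetD nums i 0
                   then PySem.List.pyGetD st.1 (i - 1) 0 + 1
                   else 1
        (PySem.List.pySetD st.1 i dpi, st.2 + dpi))
      (dp, total)).2
    = pvAGo (PySem.List.pyGetD nums ((k : Int) - 1) 0) d total (nums.drop k) := by
  by_cases hlt : k < nums.length
  · -- step case, by induction on the remaining length
    have hrec := pvFold_eq_aGo nums (k + 1)
    rw [PySem.List.pyRange_one_cons (by exact_mod_cast hlt)]
    simp only [List.foldl_cons]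
    have hkk : ((k : Int)) = ((k : Nat) : Int) := rfl
    have hget : PySem.List.pyGetD nums (k : Int) 0 = nums[k] := by
      rw [PySem.List.pyGetD_natCast]
      exact List.getD_eq_getElem nums 0 hlt
    have hdrop : nums.drop k = nums[k] :: nums.drop (k + 1) := by
      exact (List.getElem_cons_drop hlt).symm
    set dpi := if PySem.List.pyGetD nums ((k : Int) - 1) 0 < PySem.List.pyGetD nums (k : Int) 0
               then PySem.List.pyGetD dp ((k : Int) - 1) 0 + 1
               else 1 with hdpi
    have hlen' : (PySem.List.pySetD dp (k : Int) dpi).length = nums.length := by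
      rw [PySem.List.pySetD_natCast]
      simp [hlen]
    have hd' : PySem.List.pyGetD (PySem.List.pySetD dp (k : Int) dpi) (((k + 1 : Nat) : Int) - 1) 0 = dpi := by
      have : (((k + 1 : Nat) : Int) - 1) = (k : Int) := by push_cast; ring
      rw [this, PySem.List.pyGetD_pySetD_natCast _ _ _ _ _ (by omega)]
      simp
    have := hrec (PySem.List.pySetD dp (k : Int) dpi) dpi (total + dpi) (by omega) hlen' hd'
    have hcast : ((k : Int) + 1) = ((k + 1 : Nat) : Int) := by push_cast; ring
    rw [hcast]
    rw [this]
    have hprev : PySem.List.pyGetD nums (((k + 1 : Nat) : Int) - 1) 0 = nums[k] := by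
      have : (((k + 1 : Nat) : Int) - 1) = (k : Int) := by push_cast; ring
      rw [this, hget]
    rw [hprev, hdrop]
    simp only [pvAGo, hget, hdpi, hd]
  · -- base case: empty range, empty suffix
    rw [PySem.List.pyRange_one_eq_nil (by exact_mod_cast Nat.le_of_not_lt hlt)]
    rw [List.drop_eq_nil_of_le (Nat.le_of_not_lt hlt)]
    simp [pvAGo]
termination_by nums.length - k

-- triangular-number step: (d+1)*(d+2)//2 = d*(d+1)//2 + (d+1), for every integer d
theorem pvTri_step (d : Int) :
    PySem.Int.floordiv ((d + 1) * (d + 1 + 1)) 2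
      = PySem.Int.floordiv (d * (d + 1)) 2 + (d + 1) := by
  obtain ⟨m, hm⟩ := Int.even_mul_succ_self d
  have h1 : d * (d + 1) = 2 * m := by omega
  have h2 : (d + 1) * (d + 1 + 1) = 2 * (m + (d + 1)) := by nlinarith
  rw [h1, h2, PySem.Int.floordiv_eq_ediv_of_pos (by norm_num),
      PySem.Int.floordiv_eq_ediv_of_pos (by norm_num),
      Int.mul_ediv_cancel_left _ (by norm_num), Int.mul_ediv_cancel_left _ (by norm_num)]

-- the scalar loop with per-step accumulation equals B's run-length loop:
-- A's running total leads B's by the triangular number of the open run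
theorem pvAGo_eq_runLoop (l : List Int) (prev d total : Int) :
    pvAGo prev d (total + PySem.Int.floordiv (d * (d + 1)) 2) l = pvRunLoop prev d total l := by
  induction l generalizing prev d total with
  | nil => simp [pvAGo, pvRunLoop]
  | cons y ys ih =>
    simp only [pvAGo, pvRunLoop]
    by_cases h : prev < y
    · simp only [h, if_pos]
      rw [← ih y (d + 1) total]
      congr 1
      have := pvTri_step d
      omega
    · simp only [h, if_neg, not_false_eq_true]
      rw [← ih y 1 (total + PySem.Int.floordiv (d * (d + 1)) 2)]
      norm_num

-- ===== VERDICT (by name: the statement is the Claim_ definition above) =====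
theorem countSubarrays_dynamic_programming_spec : Claim_equal_countSubarrays_dynamic_programming := by
  intro nums _ hpre
  unfold Spec_countSubarrays_dynamic_programming
  match nums with
  | [] => exact absurd rfl hpre
  | x :: xs =>
    unfold countSubarrays_dynamic_programming countSubarrays_dynamic_programming_alt
    simp only [List.isEmpty_cons, if_false, Bool.false_eq_true]
    have hlen : (List.replicate (x :: xs).length (0 : Int)).length = (x :: xs).length := by simp
    have htot : PySem.List.pyGetD (PySem.List.pySetD (List.replicate (x :: xs).length (0 : Int)) 0 1) (0 : Int) 0 = 1 := by
      rw [show ((0 : Int)) = ((0 : Nat) : Int) from rfl,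
          PySem.List.pyGetD_pySetD_natCast _ _ _ _ _ (by simp)]
      simp
    have hdp0 : PySem.List.pyGetD (PySem.List.pySetD (List.replicate (x :: xs).length (0 : Int)) 0 1) (((1 : Nat) : Int) - 1) 0 = 1 := by
      simpa using htot
    have hlen' : (PySem.List.pySetD (List.replicate (x :: xs).length (0 : Int)) 0 1).length = (x :: xs).length := by
      rw [show ((0 : Int)) = ((0 : Nat) : Int) from rfl, PySem.List.pySetD_natCast]
      simp
    have hfold := pvFold_eq_aGo (x :: xs) 1
      (PySem.List.pySetD (List.replicate (x :: xs).length (0 : Int)) 0 1) 1 1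
      (le_refl 1) hlen' hdp0
    norm_num at hfold htot ⊢
    rw [htot, hfold]
    have h2 : PySem.Int.floordiv (1 * (1 + 1)) 2 = 1 := by decide
    have := pvAGo_eq_runLoop xs x 1 0
    rw [h2] at this
    simpa using this
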